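-- pv_equiv track=rewrite | github.com/bgauzere/adventofcode | 2025/day_02.py | identify_valid_id
-- ===== SOURCE A (Python) =====
-- def identify_valid_id(start, end):
--     # tester que les nombres qui ont un nombre de digits pairs
--     # 10, 1000
--     nb_ok = 0
--     sum_ok = 0
--     tested = start
--     while tested <= end:
--         s_tested = str(tested)
--         length = len(str(tested))
--         if length % 2 == 0:
--             mid = length//2
--             if s_tested[:mid] == s_tested[mid:]:
--                 nb_ok += 1
--                 sum_ok += tested
--             tested += 1
--         else:
--             tested = 10**(len(str(tested)))
--     return nb_ok, sum_ok
-- ===== SOURCE B (Python) =====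
-- def identify_valid_id(start, end):
--     # Enumerate the valid ids directly: an id with an even number of digits (2k)
--     # and equal string halves is exactly h * (10**k + 1) for a k-digit half h.
--     nb_ok = 0
--     sum_ok = 0
--     p = 10                        # p == 10**k while handling ids with 2k digits
--     while p * p // 10 <= end:     # p*p//10 is the smallest 2k-digit number
--         m = p + 1
--         for h in range(p // 10, p):
--             n = h * m
--             if start <= n <= end:
--                 nb_ok += 1
--                 sum_ok += n
--         p *= 10
--     return nb_ok, sum_ok
-- ===== Notes on version B (the rewrite author's own statement) =====
-- stated objective: faster
-- what changed: Instead of scanning every number in [start, end] and comparing string halves, B enumerates the valid ids directly as h*(10**k+1) over k-digit halves h, so only O(sqrt(end)) candidates are visited.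
-- intended difference: For start <= -10 and end >= 11, A's odd-string-length jump fires on a negative number (e.g. str(-10) has length 3) and sets tested to at least 1000, silently skipping all valid ids below that (11, 22, ..., 99, ...), so A undercounts; B returns the full count and sum of valid ids in [start, end], which is the intended value. — e.g. on identify_valid_id(-10, 11): A returns [0, 0], B returns [1, 11]
import Mathlib
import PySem

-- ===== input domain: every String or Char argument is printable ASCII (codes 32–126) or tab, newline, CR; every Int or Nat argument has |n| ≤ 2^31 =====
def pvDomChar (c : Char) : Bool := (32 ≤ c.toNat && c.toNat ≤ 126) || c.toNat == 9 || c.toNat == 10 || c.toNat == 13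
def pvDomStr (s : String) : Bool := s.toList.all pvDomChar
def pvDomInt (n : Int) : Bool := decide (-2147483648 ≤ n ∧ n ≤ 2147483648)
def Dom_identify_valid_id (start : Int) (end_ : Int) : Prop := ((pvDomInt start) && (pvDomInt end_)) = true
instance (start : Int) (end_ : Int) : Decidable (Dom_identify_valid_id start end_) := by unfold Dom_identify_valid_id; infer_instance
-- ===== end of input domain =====

-- B enumerates the valid ids directly as h*(10^k+1) over k-digit halves h, visiting
-- O(sqrt(end)) candidates instead of string-testing every number in [start, end]; for
-- start ≤ -10 and end ≥ 11 A's odd-length jump fires on a negative number and skips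
-- every valid id below 1000, so A undercounts there (stated as D_ below); B returns
-- the intended full count and sum.


-- ===== PORT A =====
-- A's while loop; (nb, sum_, tested) is the loop state.  The fuel argument only makes
-- the recursion structural: each iteration strictly increases `tested` (for the jump
-- branch see `pvLt_pow_len` below), so the initial fuel `(end_+1-start).toNat + 1`
-- is never exhausted and the fuel-0 value is unreachable.
def pvLoopA : ℕ → ℤ → ℤ → ℤ → ℤ → List ℤ
  | 0, _, nb, sum_, _ => [nb, sum_]
  | fuel + 1, end_, nb, sum_, tested =>
    if tested ≤ end_ then
      let s_tested := PySem.Int.toStr tested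
      let length := PySem.Str.len (PySem.Int.toStr tested)
      if PySem.Int.mod length 2 = 0 then
        let mid := PySem.Int.floordiv length 2
        if PySem.Str.slice s_tested none (some mid) = PySem.Str.slice s_tested (some mid) none then
          pvLoopA fuel end_ (nb + 1) (sum_ + tested) (tested + 1)
        else
          pvLoopA fuel end_ nb sum_ (tested + 1)
      else
        -- tested = 10**(len(str(tested))); the exponent is a Python int ≥ 1, so .toNat is exact
        pvLoopA fuel end_ nb sum_ ((10:ℤ) ^ (PySem.Str.len (PySem.Int.toStr tested)).toNat)
    else
      [nb, sum_]

def identify_valid_id (start : Int) (end_ : Int) : List Int :=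
  pvLoopA ((end_ + 1 - start).toNat + 1) end_ 0 0 start

-- ===== PORT B =====
-- B's while loop; p = 10^k while handling the ids with 2k digits.  The fuel argument
-- only makes the recursion structural: p grows tenfold each iteration and the loop
-- keeps p ≤ end_, so the initial fuel `end_.toNat + 2` is never exhausted.
def pvLoopB : ℕ → ℤ → ℤ → ℤ → ℤ → ℤ → List ℤ
  | 0, _, _, _, nb, sum_ => [nb, sum_]
  | fuel + 1, start, end_, p, nb, sum_ =>
    if PySem.Int.floordiv (p * p) 10 ≤ end_ then
      let m := p + 1
      let st := (PySem.List.pyRange (PySem.Int.floordiv p 10) p).foldl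
        (fun (st : ℤ × ℤ) h =>
          let n := h * m
          if start ≤ n ∧ n ≤ end_ then (st.1 + 1, st.2 + n) else st) (nb, sum_)
      pvLoopB fuel start end_ (p * 10) st.1 st.2
    else
      [nb, sum_]

def identify_valid_id_alt (start : Int) (end_ : Int) : List Int :=
  pvLoopB (end_.toNat + 2) start end_ 10 0 0

-- ===== PRECONDITION & SPEC =====
-- For start ≤ -10 and end ≥ 11 A's odd-string-length jump fires on a negative number
-- (e.g. str(-10) has length 3) and sets tested to at least 1000, silently skipping all
-- valid ids below that (11, 22, …, 99, …), so A undercounts; B returns the full count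
-- and sum of valid ids in [start, end], which is the intended value.
def D_identify_valid_id (start : Int) (end_ : Int) : Prop := start ≤ -10 ∧ 11 ≤ end_
instance (start : Int) (end_ : Int) : Decidable (D_identify_valid_id start end_) := by
  unfold D_identify_valid_id; infer_instance

def Spec_identify_valid_id (start : Int) (end_ : Int) (out : List Int) : Prop :=
  ¬ D_identify_valid_id start end_ → out = identify_valid_id_alt start end_
instance (start : Int) (end_ : Int) (out : List Int) : Decidable (Spec_identify_valid_id start end_ out) := by
  unfold Spec_identify_valid_id; infer_instance

def pvDiffWitness_identify_valid_id : Int × Int := (-10, 11)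
def pvDiffWitnessOut_identify_valid_id : (List Int) × (List Int) := ([0, 0], [1, 11])

-- ===== CLAIM (what is proved, stated in full; the proofs are below) =====
def Claim_unchanged_identify_valid_id : Prop := ∀ (start : Int) (end_ : Int), Dom_identify_valid_id start end_ → Spec_identify_valid_id start end_ (identify_valid_id start end_)
def Claim_changed_identify_valid_id : Prop := Dom_identify_valid_id (pvDiffWitness_identify_valid_id.1) (pvDiffWitness_identify_valid_id.2) ∧ D_identify_valid_id (pvDiffWitness_identify_valid_id.1) (pvDiffWitness_identify_valid_id.2) ∧ identify_valid_id (pvDiffWitness_identify_valid_id.1) (pvDiffWitness_identify_valid_id.2) = pvDiffWitnessOut_identify_valid_id.1 ∧ identify_valid_id_alt (pvDiffWitness_identify_valid_id.1) (pvDiffWitness_identify_valid_id.2) = pvDiffWitnessOut_identify_valid_id.2 ∧ pvDiffWitnessOut_identify_valid_id.1 ≠ pvDiffWitnessOut_identify_valid_id.2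
def Claim_exact_identify_valid_id : Prop := ∀ (start : Int) (end_ : Int), Dom_identify_valid_id start end_ → D_identify_valid_id start end_ → identify_valid_id start end_ ≠ identify_valid_id_alt start end_

-- ===== LEMMAS AND PROOFS =====

/- ---------- decimal digit lists ---------- -/

-- big-endian decimal digit list; equals `Nat.toDigits 10` (next two lemmas)
def pvDig (n : ℕ) : List Char :=
  if _h : n < 10 then [Nat.digitChar n]
  else pvDig (n / 10) ++ [Nat.digitChar (n % 10)]
decreasing_by exact Nat.div_lt_self (by omega) (by omega)

lemma pvToDigitsCore_eq (f : ℕ) : ∀ (n : ℕ) (acc : List Char), n < f →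
    Nat.toDigitsCore 10 f n acc = pvDig n ++ acc := by
  induction f with
  | zero => intro n acc h; omega
  | succ f ih =>
    intro n acc h
    rw [pvDig]
    by_cases h10 : n < 10
    · have hdiv : n / 10 = 0 := Nat.div_eq_of_lt h10
      simp [Nat.toDigitsCore, hdiv, h10, Nat.mod_eq_of_lt h10]
    · have hdiv : ¬ n / 10 = 0 := by omega
      simp only [Nat.toDigitsCore, hdiv, if_false, h10]
      rw [ih (n / 10) _ (by omega)]
      simp

lemma pvToDigits_eq_pvDig (n : ℕ) : Nat.toDigits 10 n = pvDig n := by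
  have := pvToDigitsCore_eq (n + 1) n [] (by omega)
  simpa [Nat.toDigits] using this

lemma pvDig_len_pos (n : ℕ) : 1 ≤ (pvDig n).length := by
  rw [pvDig]; split <;> simp

lemma pvDig_lt (n : ℕ) : n < 10 ^ (pvDig n).length := by
  induction n using Nat.strong_induction_on with
  | _ n ih =>
    rw [pvDig]
    by_cases h : n < 10
    · simpa [h] using h
    · have h1 : n / 10 < 10 ^ (pvDig (n / 10)).length :=
        ih (n / 10) (Nat.div_lt_self (by omega) (by omega))
      simp only [h, dif_neg, not_false_iff, List.length_append, List.length_cons,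
        List.length_nil, pow_succ]
      omega

lemma pvDig_ge (n : ℕ) (hn : 1 ≤ n) : 10 ^ ((pvDig n).length - 1) ≤ n := by
  induction n using Nat.strong_induction_on with
  | _ n ih =>
    rw [pvDig]
    by_cases h : n < 10
    · simpa [h] using hn
    · have h1 : 10 ^ ((pvDig (n / 10)).length - 1) ≤ n / 10 :=
        ih (n / 10) (Nat.div_lt_self (by omega) (by omega)) (by omega)
      have h2 := pvDig_len_pos (n / 10)
      simp only [h, dif_neg, not_false_iff, List.length_append, List.length_cons,
        List.length_nil]
      have : 10 ^ ((pvDig (n / 10)).length + 1 - 1) = 10 ^ ((pvDig (n / 10)).length - 1) * 10 := by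
        rw [← pow_succ]; congr 1; omega
      rw [this]
      have h3 : 10 * 10 ^ ((pvDig (n / 10)).length - 1) ≤ 10 * (n / 10) :=
        Nat.mul_le_mul_left 10 h1
      have h4 := Nat.div_add_mod n 10
      omega

-- the digit-count is determined by the block 10^(d-1) ≤ n < 10^d
lemma pvPow_block_unique {n : ℕ} {d e : ℕ} (hd1 : 1 ≤ d) (he1 : 1 ≤ e)
    (hd : 10 ^ (d - 1) ≤ n ∧ n < 10 ^ d) (he : 10 ^ (e - 1) ≤ n ∧ n < 10 ^ e) : d = e := by
  have h1 : d - 1 < e := (Nat.pow_lt_pow_iff_right (by omega)).mp (lt_of_le_of_lt hd.1 he.2)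
  have h2 : e - 1 < d := (Nat.pow_lt_pow_iff_right (by omega)).mp (lt_of_le_of_lt he.1 hd.2)
  omega

lemma pvDig_len_block (n d : ℕ) (hd : 1 ≤ d) (h1 : 10 ^ (d - 1) ≤ n) (h2 : n < 10 ^ d) :
    (pvDig n).length = d := by
  have hn : 1 ≤ n := le_trans (Nat.one_le_pow _ _ (by omega)) h1
  exact pvPow_block_unique (pvDig_len_pos n) hd
    ⟨pvDig_ge n hn, pvDig_lt n⟩ ⟨h1, h2⟩

/- ---------- zero-padded digit lists ---------- -/

def pvPad (k m : ℕ) : List Char :=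
  match k with
  | 0 => []
  | k + 1 => pvPad k (m / 10) ++ [Nat.digitChar (m % 10)]

lemma pvPad_len (k m : ℕ) : (pvPad k m).length = k := by
  induction k generalizing m with
  | zero => rfl
  | succ k ih => simp [pvPad, ih]

lemma pvDig_split (k : ℕ) : ∀ (a m : ℕ), 1 ≤ a → m < 10 ^ k →
    pvDig (a * 10 ^ k + m) = pvDig a ++ pvPad k m := by
  induction k with
  | zero => intro a m _ hm; interval_cases m <;> simp [pvPad]
  | succ k ih =>
    intro a m ha hm
    have hbig : ¬ (a * 10 ^ (k + 1) + m < 10) := by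
      have : 10 ≤ 10 ^ (k + 1) := by
        calc (10:ℕ) = 10 ^ 1 := (pow_one 10).symm
          _ ≤ 10 ^ (k + 1) := Nat.pow_le_pow_right (by omega) (by omega)
      nlinarith
    rw [pvDig, dif_neg hbig]
    have hdiv : (a * 10 ^ (k + 1) + m) / 10 = a * 10 ^ k + m / 10 := by
      rw [pow_succ]
      rw [show a * (10 ^ k * 10) + m = m + (a * 10 ^ k) * 10 by ring]
      rw [Nat.add_mul_div_right _ _ (by omega : (0:ℕ) < 10)]
      omega
    have hmod : (a * 10 ^ (k + 1) + m) % 10 = m % 10 := by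
      rw [pow_succ]
      rw [show a * (10 ^ k * 10) + m = m + (a * 10 ^ k) * 10 by ring]
      exact Nat.add_mul_mod_self_right ..
    rw [hdiv, hmod, ih a (m / 10) ha (by
      have := Nat.div_add_mod m 10
      have h10 : m < 10 ^ k * 10 := by rw [← pow_succ]; exact hm
      omega)]
    simp [pvPad]

lemma pvDig_eq_pad (k : ℕ) : ∀ (a : ℕ), 10 ^ (k - 1) ≤ a → a < 10 ^ k → pvDig a = pvPad k a := by
  induction k with
  | zero => intro a h1 h2; simp at h1 h2; omega
  | succ k ih =>
    intro a h1 h2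
    by_cases hk : k = 0
    · subst hk
      simp at h2
      rw [pvDig, dif_pos h2]
      simp [pvPad, Nat.mod_eq_of_lt h2, Nat.div_eq_of_lt h2]
    · have h10 : ¬ a < 10 := by
        have : (10:ℕ) ^ 1 ≤ 10 ^ (k + 1 - 1) := Nat.pow_le_pow_right (by omega) (by omega)
        simp only [pow_one] at this
        omega
      rw [pvDig, dif_neg h10]
      have hd1 : 10 ^ (k - 1) ≤ a / 10 := by
        apply Nat.le_div_iff_mul_le (by omega) |>.mpr
        calc 10 ^ (k - 1) * 10 = 10 ^ (k - 1 + 1) := by rw [pow_succ]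
          _ = 10 ^ (k + 1 - 1) := by congr 1; omega
          _ ≤ a := h1
      have hd2 : a / 10 < 10 ^ k := by
        apply Nat.div_lt_iff_lt_mul (by omega) |>.mpr
        calc a < 10 ^ (k + 1) := h2
          _ = 10 ^ k * 10 := by rw [pow_succ]
      rw [ih (a / 10) hd1 hd2]
      simp [pvPad]

lemma pvDigitChar_inj : ∀ a ∈ Finset.range 10, ∀ b ∈ Finset.range 10,
    Nat.digitChar a = Nat.digitChar b → a = b := by decide

lemma pvPad_inj (k : ℕ) : ∀ (m₁ m₂ : ℕ), m₁ < 10 ^ k → m₂ < 10 ^ k →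
    pvPad k m₁ = pvPad k m₂ → m₁ = m₂ := by
  induction k with
  | zero => intro m₁ m₂ h1 h2 _; simp at h1 h2; omega
  | succ k ih =>
    intro m₁ m₂ h1 h2 h
    simp only [pvPad] at h
    have hlen : (pvPad k (m₁ / 10)).length = (pvPad k (m₂ / 10)).length := by
      simp [pvPad_len]
    obtain ⟨h3, h4⟩ := List.append_inj h hlen
    have hdc : Nat.digitChar (m₁ % 10) = Nat.digitChar (m₂ % 10) := by
      simpa using h4
    have hmm : m₁ % 10 = m₂ % 10 :=
      pvDigitChar_inj _ (by simp [Nat.mod_lt _ (by omega : (0:ℕ) < 10)]) _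
        (by simp [Nat.mod_lt _ (by omega : (0:ℕ) < 10)]) hdc
    have hdd : m₁ / 10 = m₂ / 10 := by
      apply ih <;> first
        | exact h3
        | (apply Nat.div_lt_iff_lt_mul (by omega : (0:ℕ) < 10) |>.mpr
           rw [← pow_succ]; omega)
    omega

lemma pvDigitChar_ne_dash : ∀ a ∈ Finset.range 10, Nat.digitChar a ≠ '-' := by decide

lemma pvDig_ne_dash (n : ℕ) : ∀ c ∈ pvDig n, c ≠ '-' := by
  induction n using Nat.strong_induction_on with
  | _ n ih =>
    intro c hc
    rw [pvDig] at hc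
    by_cases h : n < 10
    · rw [dif_pos h] at hc
      simp only [List.mem_singleton] at hc
      subst hc
      exact pvDigitChar_ne_dash n (by simpa using h)
    · rw [dif_neg h] at hc
      rcases List.mem_append.mp hc with h1 | h1
      · exact ih (n / 10) (Nat.div_lt_self (by omega) (by omega)) c h1
      · simp only [List.mem_singleton] at h1
        subst h1
        exact pvDigitChar_ne_dash _ (by simp [Nat.mod_lt _ (by omega : (0:ℕ) < 10)])



/- ---------- the valid-id predicate and its interval count / sum ---------- -/

-- n is a valid id with 2k digits: equal string halves ↔ n = h·(10^k+1) ↔ (10^k+1) ∣ n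
def pvOkk (k : ℕ) (n : ℤ) : Bool :=
  decide ((10:ℤ) ^ (2 * k - 1) ≤ n) && decide (n < (10:ℤ) ^ (2 * k)) &&
    decide (((10:ℤ) ^ k + 1) ∣ n)

-- n is a valid id with 2k digits for some k ≥ j (every id in Dom has ≤ 10 digits, so k ≤ 5)
def pvOkFrom (j : ℕ) (n : ℤ) : Bool := decide (∃ k ∈ Finset.Icc j 5, pvOkk k n = true)

def pvOk (n : ℤ) : Bool := pvOkFrom 1 n

-- count and sum of the valid ids in [lo, hi] (with 2k digits for some j ≤ k ≤ 5)
def pvCntF (j : ℕ) (lo hi : ℤ) : ℤ :=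
  (((PySem.List.pyRange lo (hi + 1)).filter (fun n => pvOkFrom j n)).length : ℤ)

def pvSmF (j : ℕ) (lo hi : ℤ) : ℤ :=
  ((PySem.List.pyRange lo (hi + 1)).filter (fun n => pvOkFrom j n)).sum

def pvCnt (lo hi : ℤ) : ℤ := pvCntF 1 lo hi
def pvSm (lo hi : ℤ) : ℤ := pvSmF 1 lo hi

lemma pvOkk_iff (k : ℕ) (n : ℤ) : pvOkk k n = true ↔
    (10:ℤ) ^ (2 * k - 1) ≤ n ∧ n < (10:ℤ) ^ (2 * k) ∧ ((10:ℤ) ^ k + 1) ∣ n := by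
  simp [pvOkk, and_assoc]

lemma pvOk_iff (n : ℤ) : pvOk n = true ↔
    ∃ k, 1 ≤ k ∧ k ≤ 5 ∧ pvOkk k n = true := by
  simp [pvOk, pvOkFrom, Finset.mem_Icc, and_assoc]

lemma pvOkk_ge_11 {k : ℕ} {n : ℤ} (hk : 1 ≤ k) (h : pvOkk k n = true) : 11 ≤ n := by
  rw [pvOkk_iff] at h
  obtain ⟨h1, _, h3⟩ := h
  have hp : (10:ℤ) ^ 1 ≤ 10 ^ k := pow_le_pow_right₀ (by omega) hk
  have hn : 0 < n := lt_of_lt_of_le (by positivity) h1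
  have := Int.le_of_dvd hn h3
  simp only [pow_one] at hp
  omega

lemma pvOk_ge_11 {n : ℤ} (h : pvOk n = true) : 11 ≤ n := by
  obtain ⟨k, hk, _, hkk⟩ := (pvOk_iff n).mp h
  exact pvOkk_ge_11 hk hkk

-- blocks of distinct digit-counts are disjoint (Int version)
lemma pvBlock_unique_int {n : ℤ} {d e : ℕ} (hd1 : 1 ≤ d) (he1 : 1 ≤ e)
    (hd : (10:ℤ) ^ (d - 1) ≤ n ∧ n < 10 ^ d) (he : (10:ℤ) ^ (e - 1) ≤ n ∧ n < 10 ^ e) :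
    d = e := by
  have h1 : (10:ℤ) ^ (d - 1) < 10 ^ e := lt_of_le_of_lt hd.1 he.2
  have h2 : (10:ℤ) ^ (e - 1) < 10 ^ d := lt_of_le_of_lt he.1 hd.2
  have h3 : d - 1 < e := by
    by_contra hc
    exact absurd h1 (not_lt.mpr (pow_le_pow_right₀ (by omega) (by omega)))
  have h4 : e - 1 < d := by
    by_contra hc
    exact absurd h2 (not_lt.mpr (pow_le_pow_right₀ (by omega) (by omega)))
  omega

/- ---------- bridging A's string test to the predicate ---------- -/

lemma pvToChars_nonneg (t : ℤ) (h : 0 ≤ t) : PySem.Int.toChars t = pvDig t.toNat := by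
  rw [PySem.Int.toChars, if_neg (by omega), pvToDigits_eq_pvDig]

lemma pvToChars_neg (t : ℤ) (h : t < 0) : PySem.Int.toChars t = '-' :: pvDig t.natAbs := by
  rw [PySem.Int.toChars, if_pos h, pvToDigits_eq_pvDig]

lemma pvStrLen (t : ℤ) :
    PySem.Str.len (PySem.Int.toStr t) = ((PySem.Int.toChars t).length : ℤ) := by
  rw [PySem.Str.len_eq, PySem.Int.toList_toStr]

lemma pvSlices_eq_iff (s : String) (m : ℕ) :
    (PySem.Str.slice s none (some (m : ℤ)) = PySem.Str.slice s (some (m : ℤ)) none) ↔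
      s.toList.take m = s.toList.drop m := by
  constructor
  · intro h
    have := congrArg String.toList h
    rwa [PySem.Str.toList_slice, PySem.Str.toList_slice, PySem.Chars.slice_eq_listSlice,
      PySem.Chars.slice_eq_listSlice, PySem.List.slice_to _ (by positivity),
      PySem.List.slice_from _ (by positivity), Int.toNat_natCast] at this
  · intro h
    apply String.toList_inj.mp
    rw [PySem.Str.toList_slice, PySem.Str.toList_slice, PySem.Chars.slice_eq_listSlice,
      PySem.Chars.slice_eq_listSlice, PySem.List.slice_to _ (by positivity),
      PySem.List.slice_from _ (by positivity), Int.toNat_natCast]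
    exact h

-- a = b ↔ (P+1) ∣ a·P + b  (halves of a 2k-digit number)
lemma pvDvd_iff (P : ℤ) (a b : ℕ) (ha : (a:ℤ) < P) (hb : (b:ℤ) < P) :
    (a = b) ↔ (P + 1) ∣ ((a:ℤ) * P + b) := by
  constructor
  · rintro rfl
    exact ⟨a, by ring⟩
  · intro h
    have h2 : (P + 1) ∣ ((b:ℤ) - a) := by
      have heq : ((a:ℤ) * P + b) = a * (P + 1) + (b - a) := by ring
      rw [heq] at h
      exact (Int.dvd_add_right ⟨a, by ring⟩).mp h
    have ha0 : (0:ℤ) ≤ (a:ℤ) := by positivity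
    have hb0 : (0:ℤ) ≤ (b:ℤ) := by positivity
    have habs : |(b:ℤ) - a| < P + 1 := by
      clear h h2
      rw [abs_lt]; omega
    have h3 : ((b:ℤ) - a) = 0 := Int.eq_zero_of_abs_lt_dvd h2 habs
    omega

-- the equal-halves string test of a 2k-digit number is divisibility by 10^k + 1
lemma pvHalves (n k : ℕ) (hk : 1 ≤ k) (hlen : (pvDig n).length = 2 * k) :
    ((pvDig n).take k = (pvDig n).drop k) ↔ ((10:ℤ) ^ k + 1) ∣ (n : ℤ) := by
  have hn1 : 1 ≤ n := by
    by_contra hc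
    have h0 : n = 0 := by omega
    subst h0
    rw [pvDig] at hlen
    simp at hlen
    omega
  have hlt : n < 10 ^ (2 * k) := by
    have := pvDig_lt n; rwa [hlen] at this
  have hge : 10 ^ (2 * k - 1) ≤ n := by
    have := pvDig_ge n hn1; rwa [hlen] at this
  have hb : n % 10 ^ k < 10 ^ k := Nat.mod_lt _ (by positivity)
  have ha2 : n / 10 ^ k < 10 ^ k := by
    apply Nat.div_lt_iff_lt_mul (by positivity) |>.mpr
    calc n < 10 ^ (2 * k) := hlt
      _ = 10 ^ k * 10 ^ k := by rw [← pow_add]; congr 1; omega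
  have ha1 : 10 ^ (k - 1) ≤ n / 10 ^ k := by
    apply Nat.le_div_iff_mul_le (by positivity) |>.mpr
    calc 10 ^ (k - 1) * 10 ^ k = 10 ^ (2 * k - 1) := by rw [← pow_add]; congr 1; omega
      _ ≤ n := hge
  have hsplit : n = (n / 10 ^ k) * 10 ^ k + n % 10 ^ k := by
    conv_lhs => rw [← Nat.div_add_mod n (10 ^ k)]
    ring
  have hdig : pvDig n = pvDig (n / 10 ^ k) ++ pvPad k (n % 10 ^ k) := by
    conv_lhs => rw [hsplit]
    exact pvDig_split k _ _ (le_trans (Nat.one_le_pow _ _ (by omega)) ha1) hb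
  have hla : (pvDig (n / 10 ^ k)).length = k := pvDig_len_block _ k hk ha1 ha2
  have htake : (pvDig n).take k = pvDig (n / 10 ^ k) := by
    rw [hdig]
    have h := List.take_left (l₁ := pvDig (n / 10 ^ k)) (l₂ := pvPad k (n % 10 ^ k))
    rwa [hla] at h
  have hdrop : (pvDig n).drop k = pvPad k (n % 10 ^ k) := by
    rw [hdig]
    have h := List.drop_left (l₁ := pvDig (n / 10 ^ k)) (l₂ := pvPad k (n % 10 ^ k))
    rwa [hla] at h
  rw [htake, hdrop]
  have hcast : ((n:ℤ)) = ((n / 10 ^ k : ℕ):ℤ) * (10:ℤ) ^ k + ((n % 10 ^ k : ℕ):ℤ) := by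
    conv_lhs => rw [hsplit]
    push_cast
    ring
  have hPa : ((n / 10 ^ k : ℕ):ℤ) < (10:ℤ) ^ k := by exact_mod_cast ha2
  have hPb : ((n % 10 ^ k : ℕ):ℤ) < (10:ℤ) ^ k := by exact_mod_cast hb
  rw [hcast, ← pvDvd_iff ((10:ℤ) ^ k) _ _ hPa hPb]
  constructor
  · intro h
    refine pvPad_inj k _ _ ha2 hb ?_
    rw [← pvDig_eq_pad k _ ha1 ha2]
    exact h
  · intro hab
    rw [← hab]
    exact pvDig_eq_pad k _ ha1 ha2

-- A's inner test, exactly as the port states it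
def pvTest (t : ℤ) : Prop :=
  PySem.Int.mod (PySem.Str.len (PySem.Int.toStr t)) 2 = 0 ∧
    PySem.Str.slice (PySem.Int.toStr t) none
        (some (PySem.Int.floordiv (PySem.Str.len (PySem.Int.toStr t)) 2)) =
      PySem.Str.slice (PySem.Int.toStr t)
        (some (PySem.Int.floordiv (PySem.Str.len (PySem.Int.toStr t)) 2)) none

lemma pvDash_take_drop (l : List Char) (m : ℕ) (hm1 : 1 ≤ m) (hm2 : m ≤ l.length)
    (h : ('-' :: l).take m = ('-' :: l).drop m) : '-' ∈ l := by
  obtain ⟨m', rfl⟩ : ∃ m', m = m' + 1 := ⟨m - 1, by omega⟩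
  rw [List.take_succ_cons, List.drop_succ_cons] at h
  have hmem : '-' ∈ l.drop m' := by rw [← h]; exact List.mem_cons_self
  exact List.drop_subset m' l hmem

lemma pvTest_neg (t : ℤ) (ht : t < 0) : ¬ pvTest t := by
  rintro ⟨_, hsl⟩
  rw [pvStrLen] at hsl
  rw [show (((PySem.Int.toChars t).length : ℤ)) = (((PySem.Int.toChars t).length : ℕ):ℤ) by simp,
    show (2:ℤ) = ((2:ℕ):ℤ) by simp, PySem.Int.floordiv_natCast] at hsl
  rw [pvSlices_eq_iff, PySem.Int.toList_toStr] at hsl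
  rw [pvToChars_neg t ht] at hsl
  have hdl : 1 ≤ (pvDig t.natAbs).length := pvDig_len_pos _
  have hlen : ('-' :: pvDig t.natAbs).length = (pvDig t.natAbs).length + 1 := by simp
  rw [hlen] at hsl
  have hmem : '-' ∈ pvDig t.natAbs :=
    pvDash_take_drop _ _ (by omega) (by omega) hsl
  exact pvDig_ne_dash t.natAbs '-' hmem rfl

lemma pvTest_iff (t : ℤ) (ht : t < 10 ^ 10) : pvTest t ↔ pvOk t = true := by
  rcases lt_or_ge t 0 with hneg | hpos
  · constructor
    · intro h; exact absurd h (pvTest_neg t hneg)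
    · intro h; have := pvOk_ge_11 h; omega
  · -- t ≥ 0
    have hchars : PySem.Int.toChars t = pvDig t.toNat := pvToChars_nonneg t hpos
    have hL1 : 1 ≤ (pvDig t.toNat).length := pvDig_len_pos _
    have hlen : PySem.Str.len (PySem.Int.toStr t) = (((pvDig t.toNat).length : ℕ) : ℤ) := by
      rw [pvStrLen, hchars]
    have hmod : PySem.Int.mod (PySem.Str.len (PySem.Int.toStr t)) 2 =
        (((pvDig t.toNat).length % 2 : ℕ) : ℤ) := by
      rw [hlen, show (2:ℤ) = ((2:ℕ):ℤ) by simp, PySem.Int.mod_natCast]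
    have hfd : PySem.Int.floordiv (PySem.Str.len (PySem.Int.toStr t)) 2 =
        (((pvDig t.toNat).length / 2 : ℕ) : ℤ) := by
      rw [hlen, show (2:ℤ) = ((2:ℕ):ℤ) by simp, PySem.Int.floordiv_natCast]
    rcases Nat.even_or_odd (pvDig t.toNat).length with heven | hodd
    · -- length = 2k
      obtain ⟨k, hk⟩ := heven
      have hk1 : 1 ≤ k := by omega
      have hL2k : (pvDig t.toNat).length = 2 * k := by omega
      have htn1 : 1 ≤ t.toNat := by
        by_contra hc
        have h0 : t.toNat = 0 := by omega
        rw [h0, pvDig] at hL2k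
        simp at hL2k
        omega
      have hbounds : 10 ^ (2 * k - 1) ≤ t.toNat ∧ t.toNat < 10 ^ (2 * k) := by
        refine ⟨?_, ?_⟩
        · have := pvDig_ge t.toNat htn1; rwa [hL2k] at this
        · have := pvDig_lt t.toNat; rwa [hL2k] at this
      have hbint : (10:ℤ) ^ (2 * k - 1) ≤ t ∧ t < 10 ^ (2 * k) := by
        constructor
        · calc (10:ℤ) ^ (2*k-1) = ((10 ^ (2*k-1) : ℕ) : ℤ) := by push_cast; ring
            _ ≤ (t.toNat : ℤ) := by exact_mod_cast hbounds.1
            _ = t := by omega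
        · calc t = (t.toNat : ℤ) := by omega
            _ < ((10 ^ (2*k) : ℕ) : ℤ) := by exact_mod_cast hbounds.2
            _ = (10:ℤ) ^ (2*k) := by push_cast; ring
      have hk5 : k ≤ 5 := by
        by_contra hc
        have h11 : (10:ℤ) ^ 11 ≤ 10 ^ (2 * k - 1) := pow_le_pow_right₀ (by omega) (by omega)
        have h12 : (10:ℤ) ^ 11 ≤ t := le_trans h11 hbint.1
        have h13 : (10:ℤ) ^ 10 < 10 ^ 11 := by norm_num
        omega
      have htest : pvTest t ↔ ((10:ℤ) ^ k + 1) ∣ t := by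
        unfold pvTest
        rw [hmod, hfd, hL2k]
        have hmodz : ((2 * k % 2 : ℕ) : ℤ) = 0 := by simp
        have hdiv2 : (2 * k) / 2 = k := by omega
        rw [hmodz, hdiv2, pvSlices_eq_iff, PySem.Int.toList_toStr, hchars]
        have hh := pvHalves t.toNat k hk1 hL2k
        rw [hh]
        have htn : ((t.toNat : ℤ)) = t := by omega
        rw [htn]
        simp
      rw [htest, pvOk_iff]
      constructor
      · intro hdvd
        exact ⟨k, hk1, hk5, (pvOkk_iff k t).mpr ⟨hbint.1, hbint.2, hdvd⟩⟩
      · rintro ⟨k', hk'1, _, hkk'⟩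
        rw [pvOkk_iff] at hkk'
        have hkeq : 2 * k' = 2 * k :=
          pvBlock_unique_int (d := 2*k') (e := 2*k) (by omega) (by omega)
            ⟨hkk'.1, hkk'.2.1⟩ ⟨hbint.1, hbint.2⟩
        have hkk : k' = k := by omega
        subst hkk
        exact hkk'.2.2
    · -- length odd: test is false and pvOk t is false
      obtain ⟨c, hc⟩ := hodd
      constructor
      · rintro ⟨hm, _⟩
        rw [hmod] at hm
        have : (pvDig t.toNat).length % 2 = 0 := by exact_mod_cast hm
        omega
      · intro hok
        obtain ⟨k, hk1, _, hkk⟩ := (pvOk_iff t).mp hok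
        rw [pvOkk_iff] at hkk
        have hge11 := pvOkk_ge_11 hk1 ((pvOkk_iff k t).mpr hkk)
        have hn1 : 1 ≤ t.toNat := by omega
        have hblk : (10:ℤ) ^ ((pvDig t.toNat).length - 1) ≤ t ∧ t < 10 ^ (pvDig t.toNat).length := by
          constructor
          · calc (10:ℤ) ^ ((pvDig t.toNat).length - 1)
                = ((10 ^ ((pvDig t.toNat).length - 1) : ℕ) : ℤ) := by push_cast; ring
              _ ≤ (t.toNat : ℤ) := by exact_mod_cast pvDig_ge t.toNat hn1
              _ = t := by omega
          · calc t = (t.toNat : ℤ) := by omega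
              _ < ((10 ^ (pvDig t.toNat).length : ℕ) : ℤ) := by exact_mod_cast pvDig_lt t.toNat
              _ = (10:ℤ) ^ (pvDig t.toNat).length := by push_cast; ring
        have := pvBlock_unique_int (d := (pvDig t.toNat).length) (e := 2 * k) hL1 (by omega)
          hblk ⟨hkk.1, hkk.2.1⟩
        omega

/- ---------- counting over integer ranges ---------- -/

lemma pvRange_empty {lo hi : ℤ} (h : hi ≤ lo) : PySem.List.pyRange lo hi = [] := by
  rw [List.eq_nil_iff_forall_not_mem]
  intro x hx
  rw [PySem.List.mem_pyRange_one] at hx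
  omega

lemma pvCnt_empty (j : ℕ) (lo hi : ℤ) (h : hi < lo) : pvCntF j lo hi = 0 ∧ pvSmF j lo hi = 0 := by
  unfold pvCntF pvSmF
  rw [pvRange_empty (by omega)]
  simp

lemma pvPeel (lo hi : ℤ) (h : lo ≤ hi) :
    pvCnt lo hi = (if pvOk lo then 1 else 0) + pvCnt (lo + 1) hi ∧
      pvSm lo hi = (if pvOk lo then lo else 0) + pvSm (lo + 1) hi := by
  unfold pvCnt pvSm pvCntF pvSmF
  rw [PySem.List.pyRange_one_cons (by omega : lo < hi + 1), List.filter_cons]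
  by_cases hok : pvOk lo
  · rw [if_pos (by simpa [pvOk] using hok), if_pos hok, if_pos hok]
    simp only [List.length_cons, List.sum_cons]
    constructor
    · push_cast; ring
    · trivial
  · rw [if_neg (by simpa [pvOk] using hok), if_neg hok, if_neg hok]
    exact ⟨(zero_add _).symm, (zero_add _).symm⟩

lemma pvCnt_congr (lo J hi : ℤ) (hlJ : lo ≤ J)
    (h : ∀ n : ℤ, pvOk n = true → lo ≤ n → n ≤ hi → J ≤ n) :
    pvCnt lo hi = pvCnt J hi ∧ pvSm lo hi = pvSm J hi := by
  unfold pvCnt pvSm pvCntF pvSmF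
  rcases le_or_gt J (hi + 1) with hJhi | hJhi
  · rw [PySem.List.pyRange_one_append lo J (hi + 1) hlJ hJhi, List.filter_append]
    have hnil : (PySem.List.pyRange lo J).filter (fun n => pvOkFrom 1 n) = [] := by
      rw [List.filter_eq_nil_iff]
      intro a ha
      rw [PySem.List.mem_pyRange_one] at ha
      intro hok
      have := h a (by simpa [pvOk] using hok) (by omega) (by omega)
      omega
    rw [hnil]
    simp
  · have h1 : (PySem.List.pyRange lo (hi + 1)).filter (fun n => pvOkFrom 1 n) = [] := by
      rw [List.filter_eq_nil_iff]
      intro a ha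
      rw [PySem.List.mem_pyRange_one] at ha
      intro hok
      have := h a (by simpa [pvOk] using hok) (by omega) (by omega)
      omega
    rw [h1, pvRange_empty (by omega : hi + 1 ≤ J)]
    simp

lemma pvCnt_le10 (lo hi : ℤ) (hhi : hi ≤ 10) : pvCnt lo hi = 0 ∧ pvSm lo hi = 0 := by
  unfold pvCnt pvSm pvCntF pvSmF
  have h1 : (PySem.List.pyRange lo (hi + 1)).filter (fun n => pvOkFrom 1 n) = [] := by
    rw [List.filter_eq_nil_iff]
    intro a ha
    rw [PySem.List.mem_pyRange_one] at ha
    intro hok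
    have := pvOk_ge_11 (by simpa [pvOk] using hok)
    omega
  rw [h1]
  simp

/- ---------- characterizing A's loop ---------- -/

lemma pvBlock_of_dig (t : ℤ) (h0 : 1 ≤ t) :
    (10:ℤ) ^ ((pvDig t.toNat).length - 1) ≤ t ∧ t < 10 ^ (pvDig t.toNat).length := by
  have hn1 : 1 ≤ t.toNat := by omega
  constructor
  · calc (10:ℤ) ^ ((pvDig t.toNat).length - 1)
        = ((10 ^ ((pvDig t.toNat).length - 1) : ℕ) : ℤ) := by push_cast; ring
      _ ≤ (t.toNat : ℤ) := by exact_mod_cast pvDig_ge t.toNat hn1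
      _ = t := by omega
  · calc t = (t.toNat : ℤ) := by omega
      _ < ((10 ^ (pvDig t.toNat).length : ℕ) : ℤ) := by exact_mod_cast pvDig_lt t.toNat
      _ = (10:ℤ) ^ (pvDig t.toNat).length := by push_cast; ring

lemma pvDig_zero_len : (pvDig 0).length = 1 := by rw [pvDig]; simp

-- nothing valid is skipped by the jump from an odd-length nonnegative tested
lemma pvSkip_ok (t n : ℤ) (h0 : 0 ≤ t) (hL : (pvDig t.toNat).length % 2 = 1)
    (hok : pvOk n = true) (htn : t ≤ n) : (10:ℤ) ^ ((pvDig t.toNat).length) ≤ n := by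
  by_contra hc
  obtain ⟨k, hk1, _, hkk⟩ := (pvOk_iff n).mp hok
  rw [pvOkk_iff] at hkk
  have h11 := pvOk_ge_11 hok
  rcases eq_or_lt_of_le h0 with h00 | h01
  · -- t = 0, so the length is 1 and n < 10, contradicting n ≥ 11
    have : t.toNat = 0 := by omega
    rw [this, pvDig_zero_len] at hc
    simp at hc
    omega
  · have hblk := pvBlock_of_dig t (by omega)
    have heq := pvBlock_unique_int (d := (pvDig t.toNat).length) (e := 2 * k)
      (pvDig_len_pos _) (by omega)
      ⟨le_trans hblk.1 htn, by omega⟩ ⟨hkk.1, hkk.2.1⟩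
    omega

lemma pvLt_pow_len (t : ℤ) : t < (10:ℤ) ^ (PySem.Str.len (PySem.Int.toStr t)).toNat := by
  rcases lt_or_ge t 0 with h | h
  · exact lt_of_lt_of_le h (by positivity)
  · rw [pvStrLen, pvToChars_nonneg t h]
    have h1 := pvDig_lt t.toNat
    have h2 : (((pvDig t.toNat).length : ℤ)).toNat = (pvDig t.toNat).length := by simp
    rw [h2]
    calc t = (t.toNat : ℤ) := by omega
      _ < ((10 ^ (pvDig t.toNat).length : ℕ) : ℤ) := by exact_mod_cast h1
      _ = (10:ℤ) ^ (pvDig t.toNat).length := by push_cast; ring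

lemma pvModL (t : ℤ) : PySem.Int.mod (PySem.Str.len (PySem.Int.toStr t)) 2 =
    (((PySem.Int.toChars t).length % 2 : ℕ) : ℤ) := by
  rw [pvStrLen, show (((PySem.Int.toChars t).length : ℤ)) = (((PySem.Int.toChars t).length : ℕ):ℤ) by simp,
    show (2:ℤ) = ((2:ℕ):ℤ) by simp, PySem.Int.mod_natCast]

lemma pvLoopA_spec (e : ℤ) (he : e < 10 ^ 10) :
    ∀ (fuel : ℕ) (t nb s : ℤ), (e + 1 - t).toNat < fuel → (-9 ≤ t ∨ e ≤ 10) →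
      pvLoopA fuel e nb s t = [nb + pvCnt t e, s + pvSm t e] := by
  intro fuel
  induction fuel with
  | zero => intro t nb s hf _; omega
  | succ f ih =>
    intro t nb s hf hside
    by_cases hte : t ≤ e
    · simp only [pvLoopA, if_pos hte]
      by_cases hmod : PySem.Int.mod (PySem.Str.len (PySem.Int.toStr t)) 2 = 0
      · rw [if_pos hmod]
        by_cases hok : pvOk t = true
        · have htest := (pvTest_iff t (by omega)).mpr hok
          rw [if_pos htest.2]
          rw [ih (t + 1) (nb + 1) (s + t) (by omega) (by omega)]
          obtain ⟨hc, hs⟩ := pvPeel t e hte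
          rw [hc, hs, if_pos hok, if_pos hok]
          simp only [List.cons.injEq, and_true]
          constructor <;> ring
        · have htest : ¬ pvTest t := fun h => hok ((pvTest_iff t (by omega)).mp h)
          have hsl : ¬ (PySem.Str.slice (PySem.Int.toStr t) none
              (some (PySem.Int.floordiv (PySem.Str.len (PySem.Int.toStr t)) 2)) =
            PySem.Str.slice (PySem.Int.toStr t)
              (some (PySem.Int.floordiv (PySem.Str.len (PySem.Int.toStr t)) 2)) none) :=
            fun h => htest ⟨hmod, h⟩
          rw [if_neg hsl]
          rw [ih (t + 1) nb s (by omega) (by omega)]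
          obtain ⟨hc, hs⟩ := pvPeel t e hte
          have hokf : ¬ (pvOk t = true) := hok
          rw [hc, hs, if_neg hokf, if_neg hokf]
          simp
      · rw [if_neg hmod]
        have hJ1 : (1:ℤ) ≤ (10:ℤ) ^ (PySem.Str.len (PySem.Int.toStr t)).toNat := one_le_pow₀ (by omega)
        have hJt : t < (10:ℤ) ^ (PySem.Str.len (PySem.Int.toStr t)).toNat := pvLt_pow_len t
        rw [ih ((10:ℤ) ^ (PySem.Str.len (PySem.Int.toStr t)).toNat) nb s (by omega)
          (Or.inl (le_trans (by norm_num) hJ1))]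
        rcases lt_or_ge t 0 with hneg | hpos
        · -- t < 0 with odd string length forces t ≤ -10, hence e ≤ 10 by hside
          have he10 : e ≤ 10 := by
            rcases hside with h9 | h10
            · exfalso
              have habs : t.natAbs < 10 := by omega
              have hd1 : (pvDig t.natAbs).length = 1 := by
                rw [pvDig, dif_pos habs]
                rfl
              have hL : (PySem.Int.toChars t).length = 2 := by
                rw [pvToChars_neg t hneg]
                simp [hd1]
              rw [pvModL, hL] at hmod
              exact hmod rfl
            · exact h10
          obtain ⟨hc1, hs1⟩ := pvCnt_le10 t e he10
          obtain ⟨hc2, hs2⟩ := pvCnt_le10 ((10:ℤ) ^ (PySem.Str.len (PySem.Int.toStr t)).toNat) e he10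
          rw [hc1, hs1, hc2, hs2]
        · -- t ≥ 0 with odd digit-count: the jump skips no valid id
          have hLnat : (PySem.Str.len (PySem.Int.toStr t)).toNat = (pvDig t.toNat).length := by
            rw [pvStrLen, pvToChars_nonneg t hpos]
            simp
          have hLodd : (pvDig t.toNat).length % 2 = 1 := by
            rw [pvModL, pvToChars_nonneg t hpos] at hmod
            by_contra hcc
            exact hmod (by
              have : (pvDig t.toNat).length % 2 = 0 := by omega
              rw [this]
              simp)
          have hskip := pvCnt_congr t ((10:ℤ) ^ (PySem.Str.len (PySem.Int.toStr t)).toNat) e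
            (by omega) (fun n hok hln hne => by
              rw [hLnat]
              exact pvSkip_ok t n hpos hLodd hok hln)
          rw [hskip.1, hskip.2]
    · simp only [pvLoopA, if_neg hte]
      obtain ⟨hc, hs⟩ := pvCnt_empty 1 t e (by omega)
      unfold pvCnt pvSm
      rw [hc, hs]
      simp

-- A's value on the domain where the walk never jumps over positives
lemma pvA_eq (start e : ℤ) (he : e < 10 ^ 10) (hside : -9 ≤ start ∨ e ≤ 10) :
    identify_valid_id start e = [pvCnt start e, pvSm start e] := by
  unfold identify_valid_id
  rw [pvLoopA_spec e he _ start 0 0 (by omega) hside]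
  simp

/- ---------- characterizing B's loop ---------- -/

lemma pvFold (start e m : ℤ) (l : List ℤ) : ∀ (a b : ℤ),
    l.foldl (fun (st : ℤ × ℤ) h =>
        let n := h * m
        if start ≤ n ∧ n ≤ e then (st.1 + 1, st.2 + n) else st) (a, b)
      = (a + ((l.filter (fun h => decide (start ≤ h * m ∧ h * m ≤ e))).length : ℤ),
         b + ((l.filter (fun h => decide (start ≤ h * m ∧ h * m ≤ e))).map (· * m)).sum) := by
  induction l with
  | nil => intro a b; simp
  | cons x xs ih =>
    intro a b
    simp only [List.foldl_cons, List.filter_cons]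
    by_cases hx : start ≤ x * m ∧ x * m ≤ e
    · rw [if_pos hx, if_pos (by simpa using hx), ih]
      simp only [List.length_cons, List.map_cons, List.sum_cons, Prod.mk.injEq]
      constructor <;> (push_cast; ring)
    · rw [if_neg hx, if_neg (by simpa using hx), ih]

lemma pvRange_pairwise : ∀ (n : ℕ) (a b : ℤ), (b - a).toNat ≤ n →
    (PySem.List.pyRange a b).Pairwise (· < ·) := by
  intro n
  induction n with
  | zero =>
    intro a b h
    rw [pvRange_empty (by omega)]
    exact List.Pairwise.nil
  | succ n ih =>
    intro a b h
    rcases le_or_gt b a with hba | hba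
    · rw [pvRange_empty hba]; exact List.Pairwise.nil
    · rw [PySem.List.pyRange_one_cons hba]
      refine List.Pairwise.cons ?_ (ih (a + 1) b (by omega))
      intro x hx
      rw [PySem.List.mem_pyRange_one] at hx
      omega

lemma pvRange_pairwise' (a b : ℤ) : (PySem.List.pyRange a b).Pairwise (· < ·) :=
  pvRange_pairwise (b - a).toNat a b le_rfl

-- a valid id with 2k digits is exactly h·(10^k+1) for a k-digit half h
lemma pvOkk_char (k : ℕ) (hk : 1 ≤ k) (n : ℤ) :
    pvOkk k n = true ↔ ∃ h : ℤ, (10:ℤ)^(k-1) ≤ h ∧ h < 10^k ∧ n = h * ((10:ℤ)^k + 1) := by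
  have hQ1 : (1:ℤ) ≤ 10^(k-1) := one_le_pow₀ (by omega)
  have hPQ : (10:ℤ)^k = 10 * 10^(k-1) := by
    conv_lhs => rw [show k = (k-1) + 1 by omega]
    rw [pow_succ]
    ring
  have h2k1 : (10:ℤ)^(2*k-1) = 10^(k-1) * 10^k := by
    rw [← pow_add]
    congr 1
    omega
  have h2k : (10:ℤ)^(2*k) = 10^k * 10^k := by
    rw [← pow_add]
    congr 1
    omega
  rw [pvOkk_iff]
  constructor
  · rintro ⟨h1, h2, c, hc⟩
    refine ⟨c, ?_, ?_, by rw [hc]; ring⟩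
    · by_contra hcc
      push_neg at hcc
      have : n ≤ ((10:ℤ)^(k-1) - 1) * (10^k + 1) := by
        rw [hc]
        have hpos : (0:ℤ) < 10^k + 1 := by positivity
        nlinarith
      rw [h2k1] at h1
      nlinarith
    · by_contra hcc
      push_neg at hcc
      have : (10:ℤ)^k * (10^k + 1) ≤ n := by
        rw [hc]
        have hpos : (0:ℤ) < 10^k + 1 := by positivity
        nlinarith
      rw [h2k] at h2
      nlinarith
  · rintro ⟨h, hh1, hh2, rfl⟩
    refine ⟨?_, ?_, ⟨h, by ring⟩⟩
    · rw [h2k1]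
      nlinarith
    · rw [h2k]
      nlinarith

-- the image of B's inner loop for half-length k is exactly the k-level filter of [start, e]
lemma pvLevel (k : ℕ) (hk : 1 ≤ k) (start e : ℤ) :
    ((PySem.List.pyRange ((10:ℤ)^(k-1)) ((10:ℤ)^k)).filter
        (fun h => decide (start ≤ h * ((10:ℤ)^k + 1) ∧ h * ((10:ℤ)^k + 1) ≤ e))).map
      (· * ((10:ℤ)^k + 1))
      = (PySem.List.pyRange start (e + 1)).filter (fun n => pvOkk k n) := by
  have hM : (0:ℤ) < (10:ℤ)^k + 1 := by positivity
  have hpw1 : (((PySem.List.pyRange ((10:ℤ)^(k-1)) ((10:ℤ)^k)).filter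
      (fun h => decide (start ≤ h * ((10:ℤ)^k + 1) ∧ h * ((10:ℤ)^k + 1) ≤ e))).map
        (· * ((10:ℤ)^k + 1))).Pairwise (· < ·) := by
    rw [List.pairwise_map]
    exact ((pvRange_pairwise' _ _).filter _).imp
      (fun hab => by exact mul_lt_mul_of_pos_right hab hM)
  have hpw2 : ((PySem.List.pyRange start (e + 1)).filter (fun n => pvOkk k n)).Pairwise (· < ·) :=
    (pvRange_pairwise' _ _).filter _
  have hmem : ∀ x : ℤ,
      (x ∈ ((PySem.List.pyRange ((10:ℤ)^(k-1)) ((10:ℤ)^k)).filter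
        (fun h => decide (start ≤ h * ((10:ℤ)^k + 1) ∧ h * ((10:ℤ)^k + 1) ≤ e))).map
          (· * ((10:ℤ)^k + 1))) ↔
      (x ∈ (PySem.List.pyRange start (e + 1)).filter (fun n => pvOkk k n)) := by
    intro x
    simp only [List.mem_map, List.mem_filter, PySem.List.mem_pyRange_one,
      decide_eq_true_eq]
    constructor
    · rintro ⟨h, ⟨⟨hh1, hh2⟩, hr1, hr2⟩, rfl⟩
      exact ⟨⟨hr1, by omega⟩, (pvOkk_char k hk _).mpr ⟨h, hh1, hh2, rfl⟩⟩
    · rintro ⟨⟨hx1, hx2⟩, hok⟩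
      obtain ⟨h, hh1, hh2, rfl⟩ := (pvOkk_char k hk x).mp hok
      exact ⟨h, ⟨⟨hh1, hh2⟩, hx1, by omega⟩, rfl⟩
  have hperm := (List.perm_ext_iff_of_nodup
    (hpw1.imp (fun hab => ne_of_lt hab)) (hpw2.imp (fun hab => ne_of_lt hab))).mpr hmem
  exact List.eq_of_perm_of_sorted
    (fun a b _ _ hab hba => le_antisymm hab hba)
    (hpw1.imp (fun hab => le_of_lt hab)) (hpw2.imp (fun hab => le_of_lt hab)) hperm

lemma pvFilter_or (p q : ℤ → Bool) (hdisj : ∀ x : ℤ, ¬(p x = true ∧ q x = true)) :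
    ∀ l : List ℤ,
      ((l.filter (fun x => p x || q x)).length = (l.filter p).length + (l.filter q).length) ∧
      ((l.filter (fun x => p x || q x)).sum = (l.filter p).sum + (l.filter q).sum) := by
  intro l
  induction l with
  | nil => simp
  | cons x xs ih =>
    by_cases hp : p x = true
    · have hq : q x = false := Bool.eq_false_iff.mpr (fun h => hdisj x ⟨hp, h⟩)
      simp only [List.filter_cons, hp, hq, Bool.true_or, if_true, Bool.false_eq_true, if_false,
        List.length_cons, List.sum_cons]
      exact ⟨by omega, by rw [ih.2]; ring⟩
    · have hp' : p x = false := Bool.eq_false_iff.mpr hp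
      by_cases hq : q x = true
      · simp only [List.filter_cons, hp', hq, Bool.false_or, if_true, Bool.false_eq_true, if_false,
          List.length_cons, List.sum_cons]
        exact ⟨by omega, by rw [ih.2]; ring⟩
      · have hq' : q x = false := Bool.eq_false_iff.mpr hq
        simp only [List.filter_cons, hp', hq', Bool.false_or, Bool.false_eq_true, if_false]
        exact ih

lemma pvOkFrom_succ (k : ℕ) (hk1 : 1 ≤ k) (hk5 : k ≤ 5) (n : ℤ) :
    pvOkFrom k n = (pvOkk k n || pvOkFrom (k + 1) n) := by
  rw [Bool.eq_iff_iff, Bool.or_eq_true]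
  simp only [pvOkFrom, decide_eq_true_eq, Finset.mem_Icc]
  constructor
  · rintro ⟨j, ⟨hj1, hj2⟩, hj3⟩
    rcases eq_or_lt_of_le hj1 with rfl | hlt
    · exact Or.inl hj3
    · exact Or.inr ⟨j, ⟨by omega, hj2⟩, hj3⟩
  · rintro (h | ⟨j, ⟨hj1, hj2⟩, hj3⟩)
    · exact ⟨k, ⟨le_rfl, hk5⟩, h⟩
    · exact ⟨j, ⟨by omega, hj2⟩, hj3⟩

lemma pvOkk_disj (k : ℕ) (hk1 : 1 ≤ k) (n : ℤ) :
    ¬(pvOkk k n = true ∧ pvOkFrom (k + 1) n = true) := by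
  rintro ⟨h1, h2⟩
  simp only [pvOkFrom, decide_eq_true_eq, Finset.mem_Icc] at h2
  obtain ⟨j, ⟨hj1, _⟩, hj3⟩ := h2
  rw [pvOkk_iff] at h1 hj3
  have := pvBlock_unique_int (d := 2 * k) (e := 2 * j) (by omega) (by omega)
    ⟨h1.1, h1.2.1⟩ ⟨hj3.1, hj3.2.1⟩
  omega

-- splitting the level k out of the tail count
lemma pvCntF_succ (k : ℕ) (hk1 : 1 ≤ k) (hk5 : k ≤ 5) (lo hi : ℤ) :
    pvCntF k lo hi = (((PySem.List.pyRange lo (hi + 1)).filter (fun n => pvOkk k n)).length : ℤ)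
        + pvCntF (k + 1) lo hi ∧
      pvSmF k lo hi = ((PySem.List.pyRange lo (hi + 1)).filter (fun n => pvOkk k n)).sum
        + pvSmF (k + 1) lo hi := by
  unfold pvCntF pvSmF
  have hcg : (PySem.List.pyRange lo (hi + 1)).filter (fun n => pvOkFrom k n)
      = (PySem.List.pyRange lo (hi + 1)).filter (fun n => pvOkk k n || pvOkFrom (k + 1) n) :=
    List.filter_congr (fun x _ => pvOkFrom_succ k hk1 hk5 x)
  rw [hcg]
  obtain ⟨h1, h2⟩ := pvFilter_or (fun n => pvOkk k n) (fun n => pvOkFrom (k + 1) n)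
    (fun x => pvOkk_disj k hk1 x) (PySem.List.pyRange lo (hi + 1))
  rw [h1, h2]
  constructor
  · push_cast; ring
  · rfl

lemma pvCntF_zero (k : ℕ) (hk1 : 1 ≤ k) (lo hi : ℤ) (hhi : hi < (10:ℤ)^(2*k-1)) :
    pvCntF k lo hi = 0 ∧ pvSmF k lo hi = 0 := by
  unfold pvCntF pvSmF
  have h1 : (PySem.List.pyRange lo (hi + 1)).filter (fun n => pvOkFrom k n) = [] := by
    rw [List.filter_eq_nil_iff]
    intro a ha hok
    rw [PySem.List.mem_pyRange_one] at ha
    simp only [pvOkFrom, decide_eq_true_eq, Finset.mem_Icc] at hok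
    obtain ⟨j, ⟨hj1, _⟩, hj3⟩ := hok
    rw [pvOkk_iff] at hj3
    have hmono : (10:ℤ)^(2*k-1) ≤ 10^(2*j-1) := pow_le_pow_right₀ (by omega) (by omega)
    omega
  rw [h1]
  simp

lemma pvLoopB_spec (start e : ℤ) (he : e < 10 ^ 10) :
    ∀ (fuel : ℕ) (k : ℕ) (nb s : ℤ), 1 ≤ k → k ≤ 6 → 7 - k ≤ fuel →
      pvLoopB fuel start e ((10:ℤ)^k) nb s = [nb + pvCntF k start e, s + pvSmF k start e] := by
  intro fuel
  induction fuel with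
  | zero => intro k nb s hk1 hk6 hf; omega
  | succ f ih =>
    intro k nb s hk1 hk6 hf
    have hpp : PySem.Int.floordiv ((10:ℤ)^k * (10:ℤ)^k) 10 = (10:ℤ)^(2*k-1) := by
      rw [PySem.Int.floordiv_eq_ediv_of_pos (by omega), ← pow_add,
        show k + k = (2*k-1) + 1 by omega, pow_succ]
      exact Int.mul_ediv_cancel _ (by omega)
    simp only [pvLoopB]
    by_cases hcond : (10:ℤ)^(2*k-1) ≤ e
    · rw [hpp, if_pos hcond]
      have hk5 : k ≤ 5 := by
        by_contra hcc
        have hk6' : k = 6 := by omega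
        subst hk6'
        have : (10:ℤ)^(2*6-1) = 100000000000 := by norm_num
        rw [this] at hcond
        have : (10:ℤ)^10 = 10000000000 := by norm_num
        omega
      have hdiv : PySem.Int.floordiv ((10:ℤ)^k) 10 = (10:ℤ)^(k-1) := by
        rw [PySem.Int.floordiv_eq_ediv_of_pos (by omega)]
        conv_lhs => rw [show k = (k-1) + 1 by omega, pow_succ]
        exact Int.mul_ediv_cancel _ (by omega)
      rw [hdiv, pvFold start e ((10:ℤ)^k + 1) _ nb s]
      have hlvl := pvLevel k hk1 start e
      have hlen : ((PySem.List.pyRange ((10:ℤ)^(k-1)) ((10:ℤ)^k)).filter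
          (fun h => decide (start ≤ h * ((10:ℤ)^k + 1) ∧ h * ((10:ℤ)^k + 1) ≤ e))).length
          = ((PySem.List.pyRange start (e + 1)).filter (fun n => pvOkk k n)).length := by
        rw [← hlvl, List.length_map]
      have hsum : (((PySem.List.pyRange ((10:ℤ)^(k-1)) ((10:ℤ)^k)).filter
          (fun h => decide (start ≤ h * ((10:ℤ)^k + 1) ∧ h * ((10:ℤ)^k + 1) ≤ e))).map
            (· * ((10:ℤ)^k + 1))).sum
          = ((PySem.List.pyRange start (e + 1)).filter (fun n => pvOkk k n)).sum := by
        rw [hlvl]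
      rw [show (10:ℤ)^k * 10 = (10:ℤ)^(k+1) from (pow_succ 10 k).symm,
        ih (k + 1) _ _ (by omega) (by omega) (by omega)]
      obtain ⟨hc, hs⟩ := pvCntF_succ k hk1 hk5 start e
      rw [hc, hs, hlen, hsum]
      simp only [List.cons.injEq, and_true]
      constructor <;> ring
    · rw [hpp, if_neg hcond]
      obtain ⟨h1, h2⟩ := pvCntF_zero k hk1 start e (by omega)
      rw [h1, h2]
      simp

lemma pvB_eq (start e : ℤ) (he : e < 10 ^ 10) :
    identify_valid_id_alt start e = [pvCnt start e, pvSm start e] := by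
  unfold identify_valid_id_alt
  rcases le_or_gt 4 e with h4 | h4
  · have hspec := pvLoopB_spec start e he (e.toNat + 2) 1 0 0 le_rfl (by omega) (by omega)
    rw [show (10:ℤ)^1 = 10 by norm_num] at hspec
    rw [hspec]
    unfold pvCnt pvSm
    simp
  · rw [show e.toNat + 2 = (e.toNat + 1) + 1 from rfl]
    simp only [pvLoopB]
    rw [if_neg (by
      have h10 : PySem.Int.floordiv ((10:ℤ) * 10) 10 = 10 := by decide
      rw [h10]
      omega)]
    obtain ⟨h1, h2⟩ := pvCnt_le10 start e (by omega)
    rw [h1, h2]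

/- ---------- the negative-start walk of A (used for the D_ region) ---------- -/

lemma pvNat_len_ge2 (n : ℕ) (hn : 10 ≤ n) : 2 ≤ (pvDig n).length := by
  have h := pvDig_lt n
  by_contra hc
  have hle : (pvDig n).length ≤ 1 := by omega
  have hp : (10:ℕ)^(pvDig n).length ≤ 10^1 := Nat.pow_le_pow_right (by omega) hle
  simp only [pow_one] at hp
  omega

lemma pvLoopA_neg (e : ℤ) (he : e < 10 ^ 10) :
    ∀ (fuel : ℕ) (t nb s : ℤ), (e + 1 - t).toNat < fuel → t ≤ -10 →
      ∃ J : ℤ, 1000 ≤ J ∧ pvLoopA fuel e nb s t = [nb + pvCnt J e, s + pvSm J e] := by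
  intro fuel
  induction fuel with
  | zero => intro t nb s hf _; omega
  | succ f ih =>
    intro t nb s hf ht
    by_cases hte : t ≤ e
    · simp only [pvLoopA, if_pos hte]
      have hneg : t < 0 := by omega
      have habs10 : 10 ≤ t.natAbs := by omega
      have hdl2 : 2 ≤ (pvDig t.natAbs).length := pvNat_len_ge2 _ habs10
      have hLc : (PySem.Int.toChars t).length = (pvDig t.natAbs).length + 1 := by
        rw [pvToChars_neg t hneg]; simp
      by_cases hmod : PySem.Int.mod (PySem.Str.len (PySem.Int.toStr t)) 2 = 0
      · -- even string length: the '-' head never matches, step to t+1 (still ≤ -10)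
        have htest : ¬ pvTest t := pvTest_neg t hneg
        have hsl : ¬ (PySem.Str.slice (PySem.Int.toStr t) none
            (some (PySem.Int.floordiv (PySem.Str.len (PySem.Int.toStr t)) 2)) =
          PySem.Str.slice (PySem.Int.toStr t)
            (some (PySem.Int.floordiv (PySem.Str.len (PySem.Int.toStr t)) 2)) none) :=
          fun h => htest ⟨hmod, h⟩
        rw [if_pos hmod, if_neg hsl]
        have hmodn : ((pvDig t.natAbs).length + 1) % 2 = 0 := by
          rw [pvModL, hLc] at hmod
          exact_mod_cast hmod
        have hdl3 : 3 ≤ (pvDig t.natAbs).length := by omega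
        have h100 : 100 ≤ t.natAbs := by
          have hge := pvDig_ge t.natAbs (by omega)
          have hm : (10:ℕ)^2 ≤ 10^((pvDig t.natAbs).length - 1) :=
            Nat.pow_le_pow_right (by omega) (by omega)
          have h102 : (10:ℕ)^2 = 100 := by norm_num
          omega
        obtain ⟨J, hJ, heq⟩ := ih (t + 1) nb s (by omega) (by omega)
        exact ⟨J, hJ, heq⟩
      · rw [if_neg hmod]
        have hLtoNat : (PySem.Str.len (PySem.Int.toStr t)).toNat = (PySem.Int.toChars t).length := by
          rw [pvStrLen]; simp
        have hL3 : 3 ≤ (PySem.Str.len (PySem.Int.toStr t)).toNat := by omega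
        have hJ1000 : (1000:ℤ) ≤ 10 ^ (PySem.Str.len (PySem.Int.toStr t)).toNat := by
          calc (1000:ℤ) = 10 ^ 3 := by norm_num
            _ ≤ 10 ^ (PySem.Str.len (PySem.Int.toStr t)).toNat :=
              pow_le_pow_right₀ (by omega) hL3
        have hJt : t < (10:ℤ) ^ (PySem.Str.len (PySem.Int.toStr t)).toNat := pvLt_pow_len t
        rw [pvLoopA_spec e he f ((10:ℤ) ^ (PySem.Str.len (PySem.Int.toStr t)).toNat) nb s
          (by omega) (Or.inl (by omega))]
        exact ⟨(10:ℤ) ^ (PySem.Str.len (PySem.Int.toStr t)).toNat, hJ1000, rfl⟩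
    · refine ⟨1000, le_rfl, ?_⟩
      simp only [pvLoopA, if_neg hte]
      obtain ⟨h1, h2⟩ := pvCnt_empty 1 1000 e (by omega)
      unfold pvCnt pvSm
      rw [h1, h2]
      simp

lemma pvCnt_mono (lo lo' hi : ℤ) (h : lo ≤ lo') : pvCnt lo' hi ≤ pvCnt lo hi := by
  unfold pvCnt pvCntF
  rcases le_or_gt lo' (hi + 1) with hh | hh
  · rw [PySem.List.pyRange_one_append lo lo' (hi + 1) h hh, List.filter_append,
      List.length_append]
    push_cast
    omega
  · rw [pvRange_empty (by omega : hi + 1 ≤ lo')]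
    simp only [List.filter_nil, List.length_nil, Nat.cast_zero]
    exact Int.natCast_nonneg _

lemma pvCnt_lt (start e J : ℤ) (hs : start ≤ -10) (he : 11 ≤ e) (hJ : 1000 ≤ J) :
    pvCnt J e < pvCnt start e := by
  have hsplit : pvCnt start e
      = (((PySem.List.pyRange start 12).filter (fun n => pvOkFrom 1 n)).length : ℤ)
        + pvCnt 12 e := by
    unfold pvCnt pvCntF
    rw [PySem.List.pyRange_one_append start 12 (e + 1) (by omega) (by omega),
      List.filter_append, List.length_append]
    push_cast
    ring
  have h11 : (11:ℤ) ∈ (PySem.List.pyRange start 12).filter (fun n => pvOkFrom 1 n) := by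
    rw [List.mem_filter]
    exact ⟨PySem.List.mem_pyRange_one.mpr ⟨by omega, by omega⟩, by decide⟩
  have hpos : 1 ≤ (((PySem.List.pyRange start 12).filter (fun n => pvOkFrom 1 n)).length : ℤ) := by
    have hne := List.length_pos_of_mem h11
    omega
  have hmono := pvCnt_mono 12 J e (by omega)
  omega

-- ===== VERDICT (by name: the statements are the Claim_ definitions above) =====
theorem identify_valid_id_spec : Claim_unchanged_identify_valid_id := by
  unfold Claim_unchanged_identify_valid_id Spec_identify_valid_id
  intro start e hdom hnd
  unfold Dom_identify_valid_id pvDomInt at hdom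
  simp only [Bool.and_eq_true, decide_eq_true_eq] at hdom
  have he : e < 10 ^ 10 := by
    have h10 : (10:ℤ)^10 = 10000000000 := by norm_num
    omega
  unfold D_identify_valid_id at hnd
  have hside : -9 ≤ start ∨ e ≤ 10 := by omega
  rw [pvA_eq start e he hside, pvB_eq start e he]

theorem identify_valid_id_changed : Claim_changed_identify_valid_id := by
  unfold Claim_changed_identify_valid_id; decide

theorem identify_valid_id_tight : Claim_exact_identify_valid_id := by
  unfold Claim_exact_identify_valid_id
  intro start e hdom hD
  unfold D_identify_valid_id at hD
  unfold Dom_identify_valid_id pvDomInt at hdom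
  simp only [Bool.and_eq_true, decide_eq_true_eq] at hdom
  have he : e < 10 ^ 10 := by
    have h10 : (10:ℤ)^10 = 10000000000 := by norm_num
    omega
  obtain ⟨J, hJ, hA⟩ := pvLoopA_neg e he ((e + 1 - start).toNat + 1) start 0 0 (by omega) hD.1
  unfold identify_valid_id
  rw [hA, pvB_eq start e he]
  intro hEq
  simp only [List.cons.injEq, and_true] at hEq
  have hlt := pvCnt_lt start e J hD.1 hD.2 hJ
  omega
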